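-- pv_equiv track=rewrite | github.com/yaneura-no-gomi/Today-s_Lunch | src/image_croper.py | eliminate_close_element
-- ===== SOURCE A (Python) =====
-- def eliminate_close_element(l):
--     rm = []
--     for i in range(len(l)):
--         if l[i] not in rm:
--             for j in range(i + 1, len(l)):
--                 if l[j] not in rm and (l[i] - l[j]) ** 2 < 4:
--                     rm.append(l[j])
--
--     removed_l = [e for e in l if e not in rm]
--
--     return removed_l
-- ===== SOURCE B (Python) =====
-- def eliminate_close_element(l):
--     # One pass: precompute last-occurrence index per value; a kept value v at index i
--     # marks for removal any of v-1, v, v+1 that still occurs after i.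
--     last = {}
--     for i, v in enumerate(l):
--         last[v] = i
--     rm = set()
--     for i, v in enumerate(l):
--         if v not in rm:
--             for w in (v - 1, v, v + 1):
--                 if last.get(w, -1) > i:
--                     rm.add(w)
--     return [e for e in l if e not in rm]
-- ===== Notes on version B (the rewrite author's own statement) =====
-- stated objective: faster
-- what changed: Replaces A's O(n^2) nested forward rescans and list membership tests by a single pass that precomputes a last-occurrence index dict and, for each kept value v, checks only the three candidates v-1, v, v+1 against that dict, with set membership for rm.
import Mathlib
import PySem

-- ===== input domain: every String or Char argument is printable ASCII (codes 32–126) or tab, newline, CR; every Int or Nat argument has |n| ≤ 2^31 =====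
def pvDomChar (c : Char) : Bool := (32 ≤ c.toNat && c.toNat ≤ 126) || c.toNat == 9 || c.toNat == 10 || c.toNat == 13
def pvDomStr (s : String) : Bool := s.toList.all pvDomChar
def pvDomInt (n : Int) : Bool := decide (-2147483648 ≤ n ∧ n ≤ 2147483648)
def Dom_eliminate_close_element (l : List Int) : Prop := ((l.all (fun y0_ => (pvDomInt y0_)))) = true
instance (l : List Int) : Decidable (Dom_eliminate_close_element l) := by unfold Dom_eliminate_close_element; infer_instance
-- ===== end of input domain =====

-- B replaces A's quadratic nested rescans by one pass with a last-occurrence dict and a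
-- constant-size (v-1, v, v+1) neighbour check; objective: faster.

-- ===== PORT A =====
def eliminate_close_element (l : List Int) : List Int :=
  let rm : List Int :=
    (PySem.List.pyRange 0 (PySem.List.len l) 1).foldl (fun rm i =>
      if PySem.List.pyGetD l i 0 ∉ rm then
        (PySem.List.pyRange (i + 1) (PySem.List.len l) 1).foldl (fun rm j =>
          if PySem.List.pyGetD l j 0 ∉ rm ∧
              (PySem.List.pyGetD l i 0 - PySem.List.pyGetD l j 0) ^ 2 < 4 then
            rm ++ [PySem.List.pyGetD l j 0]
          else rm) rm
      else rm) []
  l.filter (fun e => e ∉ rm)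

-- ===== PORT B =====
def eliminate_close_element_alt (l : List Int) : List Int :=
  let last : PySem.Dict Int Int :=
    (PySem.List.enumerate l).foldl (fun d p => d.insert p.2 p.1) PySem.Dict.empty
  let rm : PySem.Set Int :=
    (PySem.List.enumerate l).foldl (fun rm p =>
      if p.2 ∉ rm then
        [p.2 - 1, p.2, p.2 + 1].foldl (fun rm w =>
          if last.getD w (-1) > p.1 then PySem.Set.add rm w else rm) rm
      else rm) PySem.Set.empty
  l.filter (fun e => e ∉ rm)

-- ===== PRECONDITION & SPEC =====
def Spec_eliminate_close_element (l : List Int) (out : List Int) : Prop := out = eliminate_close_element_alt l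
instance (l : List Int) (out : List Int) : Decidable (Spec_eliminate_close_element l out) := by unfold Spec_eliminate_close_element; infer_instance

-- ===== CLAIM (what is proved, stated in full; the proofs are below) =====
def Claim_equal_eliminate_close_element : Prop := ∀ (l : List Int), Dom_eliminate_close_element l → Spec_eliminate_close_element l (eliminate_close_element l)

-- ===== LEMMAS AND PROOFS =====

-- membership in a drop, phrased with total indexing (getD)
theorem mem_drop_iff_getD (l : List Int) (m : Nat) (w : Int) :
    w ∈ l.drop m ↔ ∃ k, k < l.length ∧ m ≤ k ∧ l.getD k 0 = w := by
  constructor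
  · intro h
    obtain ⟨k, hk, he⟩ := List.mem_iff_getElem.mp h
    simp only [List.length_drop] at hk
    refine ⟨m + k, by omega, by omega, ?_⟩
    rw [List.getD_eq_getElem l 0 (by omega)]
    simpa [List.getElem_drop] using he
  · rintro ⟨k, hk, hm, he⟩
    apply List.mem_iff_getElem.mpr
    refine ⟨k - m, by simp only [List.length_drop]; omega, ?_⟩
    rw [List.getElem_drop]
    rw [List.getD_eq_getElem l 0 hk] at he
    simpa [Nat.add_sub_cancel' hm] using he

-- membership after A's inner append loop
theorem mem_innerA (ys : List Int) (v : Int) :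
    ∀ (rm : List Int) (x : Int),
      x ∈ ys.foldl (fun rm w => if w ∉ rm ∧ (v - w) ^ 2 < 4 then rm ++ [w] else rm) rm ↔
        x ∈ rm ∨ (x ∈ ys ∧ (v - x) ^ 2 < 4) := by
  induction ys with
  | nil => simp
  | cons y ys ih =>
    intro rm x
    simp only [List.foldl_cons, ih, List.mem_cons]
    split_ifs with h
    · simp only [List.mem_append, List.mem_singleton]
      constructor
      · rintro ((hx | rfl) | hx)
        exacts [Or.inl hx, Or.inr ⟨Or.inl rfl, h.2⟩, Or.inr ⟨Or.inr hx.1, hx.2⟩]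
      · rintro (hx | ⟨(rfl | hy), hc⟩)
        exacts [Or.inl (Or.inl hx), Or.inl (Or.inr rfl), Or.inr ⟨hy, hc⟩]
    · have h' : (v - y) ^ 2 < 4 → y ∈ rm := by tauto
      constructor
      · rintro (hx | hx)
        exacts [Or.inl hx, Or.inr ⟨Or.inr hx.1, hx.2⟩]
      · rintro (hx | ⟨(rfl | hy), hc⟩)
        exacts [Or.inl hx, Or.inl (h' hc), Or.inr ⟨hy, hc⟩]

-- membership after B's neighbour loop (arbitrary condition c on the candidate)
theorem mem_innerB (ws : List Int) (c : Int → Prop) [DecidablePred c] :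
    ∀ (rm : PySem.Set Int) (x : Int),
      x ∈ ws.foldl (fun rm w => if c w then PySem.Set.add rm w else rm) rm ↔
        x ∈ rm ∨ (x ∈ ws ∧ c x) := by
  induction ws with
  | nil => simp
  | cons w ws ih =>
    intro rm x
    simp only [List.foldl_cons, ih, List.mem_cons]
    split_ifs with h
    · rw [PySem.Set.mem_add]
      constructor
      · rintro ((hx | rfl) | hx)
        exacts [Or.inl hx, Or.inr ⟨Or.inl rfl, h⟩, Or.inr ⟨Or.inr hx.1, hx.2⟩]
      · rintro (hx | ⟨(rfl | hy), hc⟩)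
        exacts [Or.inl (Or.inl hx), Or.inl (Or.inr rfl), Or.inr ⟨hy, hc⟩]
    · constructor
      · rintro (hx | hx)
        exacts [Or.inl hx, Or.inr ⟨Or.inr hx.1, hx.2⟩]
      · rintro (hx | ⟨(rfl | hy), hc⟩)
        exacts [Or.inl hx, absurd hc h, Or.inr ⟨hy, hc⟩]

-- the last-occurrence dict: its lookup exceeds i iff some occurrence has index s + k > i
theorem lastFold_getD_gt (l : List Int) :
    ∀ (s : Int) (d : PySem.Dict Int Int) (w i : Int),
      (((PySem.List.enumerate l s).foldl (fun d p => d.insert p.2 p.1) d).getD w (-1) > i) ↔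
        ((∃ k : Nat, k < l.length ∧ l.getD k 0 = w ∧ s + (k : Int) > i) ∨
          (w ∉ l ∧ d.getD w (-1) > i)) := by
  induction l with
  | nil => simp
  | cons x xs ih =>
    intro s d w i
    rw [PySem.List.enumerate_cons, List.foldl_cons, ih]
    constructor
    · rintro (⟨k, hk, he, hgt⟩ | ⟨hw, hd⟩)
      · exact Or.inl ⟨k + 1, by simpa using Nat.succ_lt_succ hk, by simpa using he,
          by push_cast; omega⟩
      · rw [PySem.Dict.getD_insert] at hd
        by_cases hx : w = x
        · subst hx
          rw [if_pos rfl] at hd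
          exact Or.inl ⟨0, by simp, by simp, by push_cast; omega⟩
        · rw [if_neg hx] at hd
          exact Or.inr ⟨by simp [hx, hw], hd⟩
    · rintro (⟨k, hk, he, hgt⟩ | ⟨hw, hd⟩)
      · cases k with
        | zero =>
          simp only [List.getD_cons_zero] at he
          subst he
          by_cases hxs : x ∈ xs
          · obtain ⟨k', hk', he'⟩ := List.mem_iff_getElem.mp hxs
            refine Or.inl ⟨k', hk', ?_, ?_⟩
            · rw [List.getD_eq_getElem xs 0 hk']; exact he'
            · push_cast at hgt ⊢; omega
          · refine Or.inr ⟨hxs, ?_⟩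
            rw [PySem.Dict.getD_insert, if_pos rfl]
            push_cast at hgt; omega
        | succ k =>
          simp only [List.length_cons] at hk
          exact Or.inl ⟨k, by omega, by simpa using he, by push_cast at hgt ⊢; omega⟩
      · simp only [List.mem_cons, not_or] at hw
        refine Or.inr ⟨hw.2, ?_⟩
        rw [PySem.Dict.getD_insert, if_neg hw.1]
        exact hd

-- (v - x)^2 < 4 on Int means x ∈ {v-1, v, v+1}
theorem close_iff (v x : Int) : (v - x) ^ 2 < 4 ↔ (x = v - 1 ∨ x = v ∨ x = v + 1) := by
  constructor
  · intro h
    have hlt : v - x < 2 := by nlinarith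
    have hgt : -2 < v - x := by nlinarith
    omega
  · rintro (rfl | rfl | rfl) <;> norm_num

-- the two removal loops keep membership-equal states throughout
theorem outer_mem (l : List Int) (last : PySem.Dict Int Int)
    (hlast : ∀ (w i : Int), 0 ≤ i →
      (last.getD w (-1) > i ↔ ∃ k : Nat, k < l.length ∧ l.getD k 0 = w ∧ (k : Int) > i)) :
    ∀ (js : List Int), (∀ j ∈ js, 0 ≤ j) →
    ∀ (rmA rmB : List Int), (∀ x, x ∈ rmA ↔ x ∈ rmB) →
    ∀ x,
      (x ∈ js.foldl (fun rm i =>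
          if PySem.List.pyGetD l i 0 ∉ rm then
            (PySem.List.pyRange (i + 1) (PySem.List.len l) 1).foldl (fun rm j =>
              if PySem.List.pyGetD l j 0 ∉ rm ∧
                  (PySem.List.pyGetD l i 0 - PySem.List.pyGetD l j 0) ^ 2 < 4 then
                rm ++ [PySem.List.pyGetD l j 0]
              else rm) rm
          else rm) rmA
        ↔ x ∈ js.foldl (fun rm (i : Int) =>
          if PySem.List.pyGetD l i 0 ∉ rm then
            [PySem.List.pyGetD l i 0 - 1, PySem.List.pyGetD l i 0, PySem.List.pyGetD l i 0 + 1].foldl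
              (fun rm w => if last.getD w (-1) > i then PySem.Set.add rm w else rm) rm
          else rm) rmB) := by
  intro js
  induction js with
  | nil => intro _ rmA rmB h x; simpa using h x
  | cons j js ih =>
    intro hjs rmA rmB h x
    have hj0 : 0 ≤ j := (hjs j (List.mem_cons_self ..))
    rw [List.foldl_cons (l := js), List.foldl_cons (l := js)]
    set v := PySem.List.pyGetD l j 0 with hv
    by_cases hg : v ∈ rmA
    · rw [if_neg (by simp [hg]), if_neg (by simp [← h v, hg])]
      exact ih (fun a ha => hjs a (List.mem_cons_of_mem _ ha)) rmA rmB h x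
    · rw [if_pos (by simp [hg]), if_pos (by simp [← h v, hg])]
      apply ih (fun a ha => hjs a (List.mem_cons_of_mem _ ha))
      intro y
      rw [PySem.List.foldl_pyRange_pyGetD l 0
            (fun acc w => if w ∉ acc ∧ (v - w) ^ 2 < 4 then acc ++ [w] else acc) rmA (by omega),
          mem_innerA,
          mem_innerB [v - 1, v, v + 1] (fun w => last.getD w (-1) > j) rmB y,
          mem_drop_iff_getD, hlast y j hj0, h y, close_iff]
      simp only [List.mem_cons, List.not_mem_nil, or_false]
      constructor
      · rintro (hy | ⟨⟨k, hk, hmk, he⟩, hc⟩)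
        · exact Or.inl hy
        · exact Or.inr ⟨hc, ⟨k, hk, he, by omega⟩⟩
      · rintro (hy | ⟨hc, ⟨k, hk, he, hgt⟩⟩)
        · exact Or.inl hy
        · exact Or.inr ⟨⟨k, hk, by omega, he⟩, hc⟩

theorem eliminate_close_eq (l : List Int) :
    eliminate_close_element l = eliminate_close_element_alt l := by
  unfold eliminate_close_element eliminate_close_element_alt
  have hlast : ∀ (w i : Int), 0 ≤ i →
      ((((PySem.List.enumerate l).foldl (fun d p => d.insert p.2 p.1) PySem.Dict.empty).getD w (-1) > i) ↔
        ∃ k : Nat, k < l.length ∧ l.getD k 0 = w ∧ (k : Int) > i) := by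
    intro w i hi
    rw [lastFold_getD_gt l 0 PySem.Dict.empty w i]
    simp only [PySem.Dict.getD_empty, zero_add]
    constructor
    · rintro (h | ⟨_, habs⟩)
      · exact h
      · omega
    · exact Or.inl
  have hiff := outer_mem l _ hlast (PySem.List.pyRange 0 (PySem.List.len l) 1)
      (fun j hj => (PySem.List.mem_pyRange_one.mp hj).1) [] [] (fun x => Iff.rfl)
  apply List.filter_congr
  intro x _
  simp only [decide_eq_decide]
  apply not_congr
  rw [hiff x]
  rw [PySem.List.enumerate_eq_map_pyRange (d := 0), List.foldl_map, List.foldl_map]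
  exact Iff.rfl

-- ===== VERDICT (by name: the statement is the Claim_ definition above) =====
theorem eliminate_close_element_spec : Claim_equal_eliminate_close_element := by
  intro l _
  unfold Spec_eliminate_close_element
  exact eliminate_close_eq l
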